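-- pv_equiv track=rewrite | github.com/rakshaaJey/Online-CompSci | Unit 2/Activity 1/Resistors.py | colour_finder
-- ===== SOURCE A (Python) =====
-- def colour_finder(string):
--     colour = ""
--     for counter in range(0, len(string), 1):
--         match colour.upper():
--             case "BLACK":
--                 break
--             case "BROWN":
--                 break
--             case "RED":
--                 break
--             case "ORANGE":
--                 break
--             case "YELLOW":
--                 break
--             case "GREEN":
--                 break
--             case "BLUE":
--                 break
--             case "GREY":
--                 break
--             case "VIOLET":
--                 break
--             case "WHITE":
--                 break
--
--         colour += string[counter]
--
--     return colour
-- ===== SOURCE B (Python) =====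
-- COLOURS = ("BLACK", "BROWN", "RED", "ORANGE", "YELLOW",
--            "GREEN", "BLUE", "GREY", "VIOLET", "WHITE")
--
--
-- def colour_finder(string):
--     for c in COLOURS:
--         prefix = string[:len(c)]
--         if prefix.upper() == c:
--             return prefix
--     return string
-- ===== Notes on version B (the rewrite author's own statement) =====
-- stated objective: faster
-- what changed: Instead of scanning the input character-by-character, growing an accumulator and re-uppercasing and re-checking it against a ten-arm match at every position, B probes each of the ten colour names once as a candidate prefix (string[:len(c)].upper() == c); since no colour name is a prefix of another, at most one probe can succeed, so the result is identical.
import Mathlib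
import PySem

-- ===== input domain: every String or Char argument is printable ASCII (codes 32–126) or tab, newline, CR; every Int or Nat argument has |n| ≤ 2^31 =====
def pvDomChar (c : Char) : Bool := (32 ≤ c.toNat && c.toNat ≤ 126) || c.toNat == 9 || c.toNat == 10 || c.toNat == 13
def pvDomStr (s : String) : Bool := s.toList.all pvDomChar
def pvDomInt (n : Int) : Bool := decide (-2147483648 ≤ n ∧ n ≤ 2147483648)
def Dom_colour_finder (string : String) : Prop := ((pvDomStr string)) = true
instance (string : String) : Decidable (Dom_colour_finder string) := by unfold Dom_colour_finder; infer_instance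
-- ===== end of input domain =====

-- B probes each of the ten colour names once as a candidate prefix instead of scanning the
-- input character-by-character with a ten-arm match at every position (objective: simpler).

set_option maxHeartbeats 1000000


-- ===== PORT A =====
-- the for-loop with break: structural recursion over the remaining characters,
-- `colour` the accumulator; the match/case chain is the if-chain, in source order
def pvGoA (colour : List Char) (rest : List Char) : List Char :=
  match rest with
  | [] => colour
  | c :: r =>
    let u := PySem.Chars.upper colour
    if u = "BLACK".toList then colour
    else if u = "BROWN".toList then colour
    else if u = "RED".toList then colour
    else if u = "ORANGE".toList then colour
    else if u = "YELLOW".toList then colour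
    else if u = "GREEN".toList then colour
    else if u = "BLUE".toList then colour
    else if u = "GREY".toList then colour
    else if u = "VIOLET".toList then colour
    else if u = "WHITE".toList then colour
    else pvGoA (colour ++ [c]) r

def colour_finder (string : String) : String :=
  String.ofList (pvGoA [] string.toList)

-- ===== PORT B =====
def pvColours : List (List Char) :=
  ["BLACK".toList, "BROWN".toList, "RED".toList, "ORANGE".toList, "YELLOW".toList,
   "GREEN".toList, "BLUE".toList, "GREY".toList, "VIOLET".toList, "WHITE".toList]

-- the for-loop over COLOURS with early return
def pvGoB (s : List Char) : List (List Char) → List Char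
  | [] => s
  | n :: rest =>
    let p := PySem.Chars.slice s none (some (n.length : Int))   -- string[:len(c)]
    if PySem.Chars.upper p = n then p else pvGoB s rest

def colour_finder_alt (string : String) : String :=
  String.ofList (pvGoB string.toList pvColours)

-- ===== PRECONDITION & SPEC =====
def Spec_colour_finder (string : String) (out : String) : Prop := out = colour_finder_alt string
instance (string : String) (out : String) : Decidable (Spec_colour_finder string out) := by unfold Spec_colour_finder; infer_instance

-- ===== CLAIM (what is proved, stated in full; the proofs are below) =====
def Claim_equal_colour_finder : Prop := ∀ (string : String), Dom_colour_finder string → Spec_colour_finder string (colour_finder string)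

-- ===== LEMMAS AND PROOFS =====

-- A's loop body: break (return the accumulator) iff its upper-case form is a colour name
theorem pvGoA_cons (colour : List Char) (c : Char) (r : List Char) :
    pvGoA colour (c :: r) =
      if PySem.Chars.upper colour ∈ pvColours then colour else pvGoA (colour ++ [c]) r := by
  simp only [pvGoA, pvColours, List.mem_cons, List.not_mem_nil, or_false]
  split_ifs <;> simp_all

theorem pvGoA_of_mem (colour : List Char) (rest : List Char)
    (h : PySem.Chars.upper colour ∈ pvColours) : pvGoA colour rest = colour := by
  cases rest with
  | nil => rfl
  | cons c r => rw [pvGoA_cons, if_pos h]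

-- as long as no prefix matched, A's scan just advances
theorem pvGoA_walk (s : List Char) :
    ∀ k, k ≤ s.length → (∀ j, j < k → PySem.Chars.upper (s.take j) ∉ pvColours) →
      pvGoA [] s = pvGoA (s.take k) (s.drop k) := by
  intro k
  induction k with
  | zero => intro _ _; simp
  | succ k ih =>
    intro hk h
    have hklt : k < s.length := Nat.lt_of_succ_le hk
    rw [ih (Nat.le_of_lt hklt) (fun j hj => h j (Nat.lt_succ_of_lt hj))]
    rw [List.drop_eq_getElem_cons hklt, pvGoA_cons, if_neg (h k (Nat.lt_succ_self k))]
    rw [List.take_add_one, List.getElem?_eq_getElem hklt]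
    rfl

theorem pvGoB_cons (s n : List Char) (L : List (List Char)) :
    pvGoB s (n :: L) =
      if PySem.Chars.upper (s.take n.length) = n then s.take n.length else pvGoB s L := by
  simp only [pvGoB, PySem.Chars.slice_eq_listSlice, PySem.List.slice_to_natCast]

theorem pvGoB_of_none (s : List Char) (L : List (List Char))
    (h : ∀ n ∈ L, PySem.Chars.upper (s.take n.length) = n → s.take n.length = s) :
    pvGoB s L = s := by
  induction L with
  | nil => rfl
  | cons n L ih =>
    rw [pvGoB_cons]
    split_ifs with hm
    · exact h n (List.mem_cons_self ..) hm
    · exact ih (fun m hmem => h m (List.mem_cons_of_mem _ hmem))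

theorem pvGoB_of_unique (s n₀ : List Char) (L : List (List Char))
    (hmem : n₀ ∈ L) (hmatch : PySem.Chars.upper (s.take n₀.length) = n₀)
    (huniq : ∀ n ∈ L, PySem.Chars.upper (s.take n.length) = n → n = n₀) :
    pvGoB s L = s.take n₀.length := by
  induction L with
  | nil => exact absurd hmem (List.not_mem_nil)
  | cons n L ih =>
    rw [pvGoB_cons]
    split_ifs with hm
    · rw [huniq n (List.mem_cons_self ..) hm]
    · rcases List.mem_cons.mp hmem with rfl | h'
      · exact absurd hmatch hm
      · exact ih h' (fun m hmemm => huniq m (List.mem_cons_of_mem _ hmemm))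

-- no colour name is a prefix of another
theorem pvNames_nonprefix : ∀ m ∈ pvColours, ∀ n ∈ pvColours, m <+: n → m = n := by decide

theorem pvUpper_length (l : List Char) : (PySem.Chars.upper l).length = l.length := by
  simp [PySem.Chars.upper]

theorem pvUpper_prefix {l₁ l₂ : List Char} (h : l₁ <+: l₂) :
    PySem.Chars.upper l₁ <+: PySem.Chars.upper l₂ := by
  simpa [PySem.Chars.upper] using h.map PySem.Chars.upperChar

-- any name matching as a prefix is no longer than the string
theorem pvMatch_le (s n : List Char) (h : PySem.Chars.upper (s.take n.length) = n) :
    n.length ≤ s.length := by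
  have := congrArg List.length h
  rw [pvUpper_length, List.length_take] at this
  omega

theorem pvMain (s : List Char) : pvGoA [] s = pvGoB s pvColours := by
  by_cases hM : ∃ i, i < s.length ∧ PySem.Chars.upper (s.take i) ∈ pvColours
  · -- some proper prefix matches; the least such position i₀
    have hP : ∃ i, i < s.length ∧ PySem.Chars.upper (s.take i) ∈ pvColours := hM
    set i₀ := Nat.find hP with hi₀
    obtain ⟨hlt, hmem⟩ := Nat.find_spec hP
    set n₀ := PySem.Chars.upper (s.take i₀) with hn₀
    have hlen : n₀.length = i₀ := by
      rw [hn₀, pvUpper_length, List.length_take]; omega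
    have hmatch : PySem.Chars.upper (s.take n₀.length) = n₀ := by rw [hlen]
    -- A reaches position i₀ then breaks
    have hA : pvGoA [] s = s.take i₀ := by
      rw [pvGoA_walk s i₀ (Nat.le_of_lt hlt)
        (fun j hj => by
          have := Nat.find_min hP hj
          push Not at this
          exact this (lt_trans hj hlt))]
      exact pvGoA_of_mem _ _ hmem
    -- B's only successful probe is n₀
    have hB : pvGoB s pvColours = s.take n₀.length := by
      refine pvGoB_of_unique s n₀ pvColours hmem hmatch ?_
      intro n hn hmn
      have hnle : n.length ≤ s.length := pvMatch_le s n hmn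
      rcases Nat.lt_or_ge n.length i₀ with hlt' | hge
      · -- would contradict minimality of i₀
        have hns : n.length < s.length := lt_of_lt_of_le (lt_of_lt_of_le hlt' (Nat.le_of_lt hlt)) le_rfl
        have hmem' : PySem.Chars.upper (s.take n.length) ∈ pvColours := by
          rw [hmn]; exact hn
        have := Nat.find_min hP hlt'
        push Not at this
        exact absurd hmem' (this hns)
      · -- take i₀ is a prefix of take n.length, so n₀ is a prefix of n
        have hpre : s.take i₀ <+: s.take n.length := by
          have : List.take i₀ (List.take n.length s) = List.take i₀ s := by
            rw [List.take_take, Nat.min_eq_left hge]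
          exact this ▸ List.take_prefix i₀ (List.take n.length s)
        have := pvUpper_prefix hpre
        rw [← hn₀, hmn] at this
        exact (pvNames_nonprefix n₀ hmem n hn this).symm
    rw [hA, hB, hlen]
  · -- no proper prefix matches: both return the whole string
    push Not at hM
    have hA : pvGoA [] s = s := by
      have := pvGoA_walk s s.length le_rfl (fun j hj => hM j hj)
      rw [this, List.take_of_length_le le_rfl, List.drop_of_length_le le_rfl]
      rfl
    have hB : pvGoB s pvColours = s := by
      refine pvGoB_of_none s pvColours ?_
      intro n hn hmn
      have hle : n.length ≤ s.length := pvMatch_le s n hmn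
      rcases Nat.lt_or_ge n.length s.length with hlt | hge
      · have hmem' : PySem.Chars.upper (s.take n.length) ∈ pvColours := by
          rw [hmn]; exact hn
        exact absurd hmem' (hM n.length hlt)
      · exact List.take_of_length_le hge
    rw [hA, hB]

-- ===== VERDICT (by name: the statement is the Claim_ definition above) =====
theorem colour_finder_spec : Claim_equal_colour_finder := by
  intro string _
  unfold Spec_colour_finder colour_finder colour_finder_alt
  rw [pvMain]
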